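-- pv_equiv track=rewrite | github.com/kumarankm/HackerrankSolution | Problem Solving/Algorithm/Python/climbing-the-leaderboard.py | climbingLeaderboard
-- ===== SOURCE A (Python) =====
-- def climbingLeaderboard(ranked, player):
--     final = []
--     rankedd = set(ranked)
--     ranked1 = list(rankedd)
--     ranked1.sort(reverse = True)
--     for i in player:
--         ranked1.append(i)
--         ranked1.sort(reverse = True)
--         rank = ranked1.index(i) + 1
--         final.append(rank)
--     return final
-- ===== SOURCE B (Python) =====
-- def climbingLeaderboard(ranked, player):
--     # distinct leaderboard scores, ascending, ranked once up front
--     dist = sorted(set(ranked))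
--     n = len(dist)
--     prev = []          # previously processed player scores, kept sorted ascending
--     final = []
--     for p in player:
--         g = (n - _count_le(dist, p)) + (len(prev) - _count_le(prev, p))
--         final.append(g + 1)
--         prev.insert(_count_le(prev, p), p)
--     return final
--
--
-- def _count_le(xs, p):
--     # number of elements of the ascending-sorted list xs that are <= p (binary search)
--     lo, hi = 0, len(xs)
--     while lo < hi:
--         mid = (lo + hi) // 2
--         if xs[mid] <= p:
--             lo = mid + 1
--         else:
--             hi = mid
--     return lo
-- ===== Notes on version B (the rewrite author's own statement) =====
-- stated objective: faster
-- what changed: A re-sorts the whole accumulated leaderboard and scans for the score's index once per player; B sorts the distinct leaderboard once and answers each player with binary searches (over the ranked scores and over a sorted list of previous player scores maintained by sorted insertion), eliminating every per-player full sort and linear index scan.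
import Mathlib
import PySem

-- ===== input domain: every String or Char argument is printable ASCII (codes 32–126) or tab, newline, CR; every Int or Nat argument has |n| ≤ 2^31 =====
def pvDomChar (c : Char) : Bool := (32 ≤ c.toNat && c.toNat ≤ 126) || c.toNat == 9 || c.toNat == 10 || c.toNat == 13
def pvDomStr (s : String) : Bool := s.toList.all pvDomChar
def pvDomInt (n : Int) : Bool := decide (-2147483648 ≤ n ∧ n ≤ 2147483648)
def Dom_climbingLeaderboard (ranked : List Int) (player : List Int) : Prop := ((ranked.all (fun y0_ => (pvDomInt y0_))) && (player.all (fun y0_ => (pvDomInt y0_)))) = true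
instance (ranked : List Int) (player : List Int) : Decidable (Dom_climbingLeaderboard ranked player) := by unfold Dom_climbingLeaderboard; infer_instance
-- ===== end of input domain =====

-- B replaces A's per-player full re-sort + linear index scan by one up-front sort of the
-- distinct scores plus binary searches (objective: faster).

-- ===== PORT A =====
def climbingLeaderboard (ranked : List Int) (player : List Int) : List Int :=
  (player.foldl
    (fun (st : List Int × List Int) i =>
      let r1 := PySem.List.sorted (st.1 ++ [i]) (fun x => x) true
      -- i ∈ r1 always, so Python's .index never raises here; '.getD 0' is exact
      let rank : Int := ((PySem.List.index? r1 i).getD 0 : Int) + 1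
      (r1, st.2 ++ [rank]))
    (PySem.List.sorted (PySem.Set.ofList ranked) (fun x => x) true, ([] : List Int))).2

-- ===== PORT B =====
-- port of Source B's _count_le while-loop, as fuel recursion (fuel = hi - lo at entry suffices)
def pvCountLEAux (xs : List Int) (p : Int) (lo hi : Int) (fuel : Nat) : Int :=
  match fuel with
  | 0 => lo
  | fuel + 1 =>
    if lo < hi then
      let mid := PySem.Int.floordiv (lo + hi) 2
      -- 0 ≤ mid < len xs whenever lo < hi stays within bounds, so Python's xs[mid] never raises
      if PySem.List.pyGetD xs mid 0 ≤ p then pvCountLEAux xs p (mid + 1) hi fuel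
      else pvCountLEAux xs p lo mid fuel
    else lo

def pvCountLE (xs : List Int) (p : Int) : Int :=
  pvCountLEAux xs p 0 (xs.length : Int) xs.length

def climbingLeaderboard_alt (ranked : List Int) (player : List Int) : List Int :=
  let dist := PySem.List.sorted (PySem.Set.ofList ranked) (fun x => x) false
  let n : Int := (dist.length : Int)
  (player.foldl
    (fun (st : List Int × List Int) p =>
      let g := (n - pvCountLE dist p) + ((st.1.length : Int) - pvCountLE st.1 p)
      (PySem.List.insert st.1 (pvCountLE st.1 p) p, st.2 ++ [g + 1]))
    (([] : List Int), ([] : List Int))).2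

-- ===== PRECONDITION & SPEC =====
def Spec_climbingLeaderboard (ranked : List Int) (player : List Int) (out : List Int) : Prop := out = climbingLeaderboard_alt ranked player
instance (ranked : List Int) (player : List Int) (out : List Int) : Decidable (Spec_climbingLeaderboard ranked player out) := by unfold Spec_climbingLeaderboard; infer_instance

-- ===== CLAIM (what is proved, stated in full; the proofs are below) =====
def Claim_equal_climbingLeaderboard : Prop := ∀ (ranked : List Int) (player : List Int), Dom_climbingLeaderboard ranked player → Spec_climbingLeaderboard ranked player (climbingLeaderboard ranked player)

-- ===== LEMMAS AND PROOFS =====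

def pvCntGt (l : List Int) (p : Int) : Int := (l.countP (fun x => decide (p < x)) : Int)
def pvCntLE (l : List Int) (p : Int) : Nat := l.countP (fun x => decide (x ≤ p))

-- L0: boundary characterisation in a sorted-ascending list
theorem pvCntLE_boundary (p : Int) (xs : List Int) (hs : xs.Pairwise (· ≤ ·)) :
    ∀ k (hk : k < xs.length), (xs[k] ≤ p ↔ k < pvCntLE xs p) := by
  induction xs with
  | nil => intro k hk; simp at hk
  | cons a t ih =>
    rcases List.pairwise_cons.mp hs with ⟨ha, ht⟩
    intro k hk
    by_cases hap : a ≤ p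
    · have : pvCntLE (a :: t) p = pvCntLE t p + 1 := by
        simp [pvCntLE, hap]
      cases k with
      | zero => simpa [this] using hap
      | succ k =>
        have hk' : k < t.length := by simpa using hk
        simpa [this] using ih ht k hk'
    · have hz : pvCntLE (a :: t) p = 0 := by
        have : pvCntLE t p = 0 := by
          refine List.countP_eq_zero.mpr ?_
          intro x hx
          simp only [decide_eq_true_eq]
          intro hxp
          exact hap (le_trans (ha x hx) hxp)
        simp [pvCntLE, hap] at this ⊢
        simpa [pvCntLE] using this
      cases k with
      | zero => simp [hz, hap]
      | succ k =>
        have hk' : k < t.length := by simpa using hk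
        have : ¬ (a :: t)[k+1] ≤ p := by
          simp only [List.getElem_cons_succ]
          intro hle
          exact hap (le_trans (ha _ (List.getElem_mem hk')) hle)
        simp only [hz, List.getElem_cons_succ]
        constructor
        · intro hle; exact absurd hle (by simpa using this)
        · omega

theorem pvCountLEAux_spec (xs : List Int) (p : Int) (hs : xs.Pairwise (· ≤ ·)) :
    ∀ (fuel : Nat) (lo hi : Int), 0 ≤ lo → hi ≤ (xs.length : Int) →
      lo ≤ (pvCntLE xs p : Int) → (pvCntLE xs p : Int) ≤ hi → hi - lo ≤ (fuel : Int) →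
      pvCountLEAux xs p lo hi fuel = (pvCntLE xs p : Int) := by
  intro fuel
  induction fuel with
  | zero => intro lo hi h0 hlen hlc hch hf; simp only [pvCountLEAux]; omega
  | succ fuel ih =>
    intro lo hi h0 hlen hlc hch hf
    simp only [pvCountLEAux]
    by_cases hlh : lo < hi
    · simp only [if_pos hlh]
      set mid := PySem.Int.floordiv (lo + hi) 2 with hmid
      obtain ⟨hm1, hm2⟩ := PySem.Int.floordiv_two_mid_bounds (le_of_lt hlh)
      have hmlt : mid < hi := by
        rw [hmid]
        rw [PySem.Int.floordiv_lt_iff_lt_mul (by norm_num)]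
        omega
      have hmr : 0 ≤ mid := le_trans h0 hm1
      have hmr2 : mid < (xs.length : Int) := lt_of_lt_of_le hmlt hlen
      have hget : PySem.List.pyGetD xs mid 0 = xs[mid.toNat] :=
        PySem.List.pyGetD_eq_getElem (xs := xs) (d := 0) hmr hmr2
      have hkk : mid.toNat < xs.length := by omega
      have hbound := pvCntLE_boundary p xs hs mid.toNat hkk
      by_cases hle : PySem.List.pyGetD xs mid 0 ≤ p
      · simp only [if_pos hle]
        have : mid.toNat < pvCntLE xs p := hbound.mp (by rwa [hget] at hle)
        exact ih (mid + 1) hi (by omega) hlen (by omega) hch (by omega)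
      · simp only [if_neg hle]
        have : ¬ mid.toNat < pvCntLE xs p := fun h => hle (by rw [hget]; exact hbound.mpr h)
        exact ih lo mid h0 (le_of_lt hmr2) hlc (by omega) (by omega)
    · simp only [if_neg hlh]; omega

theorem pvCountLE_spec (xs : List Int) (p : Int) (hs : xs.Pairwise (· ≤ ·)) :
    pvCountLE xs p = (pvCntLE xs p : Int) := by
  refine pvCountLEAux_spec xs p hs xs.length 0 (xs.length : Int) le_rfl le_rfl
    (by positivity) ?_ (by omega)
  exact_mod_cast List.countP_le_length (p := fun x => decide (x ≤ p)) (l := xs)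

-- length split: cntLE + cntGt = length
theorem pvCnt_split (xs : List Int) (p : Int) :
    (xs.length : Int) - (pvCntLE xs p : Int) = pvCntGt xs p := by
  induction xs with
  | nil => simp [pvCntLE, pvCntGt]
  | cons a t ih =>
    unfold pvCntLE pvCntGt at *
    simp only [List.countP_cons, List.length_cons]
    rcases le_or_gt a p with h | h
    · have h1 : decide (a ≤ p) = true := by simpa
      have h2 : decide (p < a) = false := by simp; omega
      simp only [h1, h2]
      push_cast
      omega
    · have h1 : decide (a ≤ p) = false := by simp; omega
      have h2 : decide (p < a) = true := by simpa
      simp only [h1, h2]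
      push_cast
      omega

-- L4: first index of i in a non-increasing list = number of elements strictly greater than i
theorem pvIndex_desc (i : Int) : ∀ (s : List Int), s.Pairwise (fun a b => b ≤ a) → i ∈ s →
    PySem.List.index? s i = some (s.countP (fun x => decide (i < x))) := by
  intro s
  induction s with
  | nil => intro _ h; simp at h
  | cons a t ih =>
    intro hp hm
    rcases List.pairwise_cons.mp hp with ⟨ha, ht⟩
    by_cases hai : a = i
    · subst hai
      have hz : t.countP (fun x => decide (a < x)) = 0 := by
        refine List.countP_eq_zero.mpr ?_
        intro x hx
        simp only [decide_eq_true_eq]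
        exact fun hlt => absurd (ha x hx) (by omega)
      rw [PySem.List.index?_cons_self]
      simp [hz]
    · have hmt : i ∈ t := by
        rcases List.mem_cons.mp hm with h | h
        · exact absurd (Eq.symm h) hai
        · exact h
      have hia : i < a := by
        have := ha i hmt
        omega
      rw [PySem.List.index?_cons_of_ne t hai, ih ht hmt]
      have hd : decide (i < a) = true := by simpa
      simp only [Option.map_some, List.countP_cons, hd, if_true]

-- L5: inserting p at position cntLE keeps the list sorted and is a permutation of appending
theorem pvInsert_sorted (xs : List Int) (p : Int) (hs : xs.Pairwise (· ≤ ·)) :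
    (PySem.List.insert xs ((pvCntLE xs p : Nat) : Int) p).Pairwise (· ≤ ·) ∧
    (PySem.List.insert xs ((pvCntLE xs p : Nat) : Int) p).Perm (xs ++ [p]) := by
  have hc : pvCntLE xs p ≤ xs.length :=
    List.countP_le_length (p := fun x => decide (x ≤ p)) (l := xs)
  have hle : ∀ j (hj : j < xs.length), j < pvCntLE xs p → xs[j] ≤ p := fun j hj hjc =>
    (pvCntLE_boundary p xs hs j hj).mpr hjc
  have hgt : ∀ j (hj : j < xs.length), pvCntLE xs p ≤ j → p < xs[j] := by
    intro j hj hjc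
    by_contra h
    have := (pvCntLE_boundary p xs hs j hj).mp (by omega)
    omega
  rw [PySem.List.insert_natCast xs (pvCntLE xs p) p hc]
  constructor
  · rw [List.pairwise_append]
    refine ⟨hs.sublist (List.take_sublist _ _), ?_, ?_⟩
    · rw [List.pairwise_cons]
      refine ⟨?_, hs.sublist (List.drop_sublist _ _)⟩
      intro x hx
      obtain ⟨k, hk, rfl⟩ := List.mem_iff_getElem.mp hx
      rw [List.getElem_drop]
      have hkk : pvCntLE xs p + k < xs.length := by
        simp only [List.length_drop] at hk; omega
      exact le_of_lt (hgt _ hkk (by omega))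
    · intro a ha b hb
      obtain ⟨j, hj, rfl⟩ := List.mem_iff_getElem.mp ha
      have hj' : j < pvCntLE xs p := by
        simp only [List.length_take] at hj; omega
      rw [List.getElem_take]
      have hap : xs[j]'(by omega) ≤ p := hle j (by omega) hj'
      rcases List.mem_cons.mp hb with rfl | hbd
      · exact hap
      · obtain ⟨k, hk, rfl⟩ := List.mem_iff_getElem.mp hbd
        rw [List.getElem_drop]
        have hkk : pvCntLE xs p + k < xs.length := by
          simp only [List.length_drop] at hk; omega
        exact le_trans hap (le_of_lt (hgt _ hkk (by omega)))
  · have h1 : (List.take (pvCntLE xs p) xs ++ p :: List.drop (pvCntLE xs p) xs).Perm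
        (p :: xs) := by
      have h2 := List.perm_middle (a := p) (l₁ := List.take (pvCntLE xs p) xs)
        (l₂ := List.drop (pvCntLE xs p) xs)
      simpa [List.take_append_drop] using h2
    exact h1.trans (List.perm_append_singleton p xs).symm

def pvModel (d : List Int) : List Int → List Int → List Int
  | _pref, [] => []
  | pref, p :: rest => (pvCntGt d p + pvCntGt pref p + 1) :: pvModel d (pref ++ [p]) rest

theorem pvA_fold (d : List Int) : ∀ (rest pref r1 acc : List Int),
    r1.Perm (d ++ pref) → r1.Pairwise (fun a b => b ≤ a) →
    (rest.foldl
      (fun (st : List Int × List Int) i =>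
        let r1' := PySem.List.sorted (st.1 ++ [i]) (fun x => x) true
        let rank : Int := ((PySem.List.index? r1' i).getD 0 : Int) + 1
        (r1', st.2 ++ [rank])) (r1, acc)).2 = acc ++ pvModel d pref rest := by
  intro rest
  induction rest with
  | nil => intro pref r1 acc _ _; simp [pvModel]
  | cons p rest ih =>
    intro pref r1 acc hperm hsort
    rw [List.foldl_cons]
    simp only []
    set r1' := PySem.List.sorted (r1 ++ [p]) (fun x => x) true with hr1'
    have hsp : r1'.Perm (r1 ++ [p]) := PySem.List.sorted_perm _ _ _
    have hperm' : r1'.Perm (d ++ (pref ++ [p])) := by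
      refine hsp.trans ?_
      have := hperm.append_right [p]
      simpa [List.append_assoc] using this
    have hsort' : r1'.Pairwise (fun a b => b ≤ a) := by
      have := PySem.List.sorted_pairwise_rev (xs := r1 ++ [p]) (key := fun x => x)
      simpa using this
    have hmem : p ∈ r1' := by
      rw [PySem.List.mem_sorted]
      simp
    have hidx : PySem.List.index? r1' p = some (r1'.countP (fun x => decide (p < x))) :=
      pvIndex_desc p r1' hsort' hmem
    have hcnt : r1'.countP (fun x => decide (p < x)) =
        d.countP (fun x => decide (p < x)) + pref.countP (fun x => decide (p < x)) := by
      rw [hsp.countP_eq, List.countP_append, hperm.countP_eq, List.countP_append]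
      simp
    rw [ih (pref ++ [p]) r1' (acc ++ [((PySem.List.index? r1' p).getD 0 : Int) + 1]) hperm' hsort']
    simp only [pvModel, hidx, Option.getD_some, List.append_assoc, List.singleton_append]
    congr 2
    unfold pvCntGt
    push_cast [hcnt]
    ring

theorem pvB_fold (d0 dist : List Int) (hdperm : dist.Perm d0) (hd : dist.Pairwise (· ≤ ·)) :
    ∀ (rest pref prev acc : List Int), prev.Perm pref → prev.Pairwise (· ≤ ·) →
    (rest.foldl
      (fun (st : List Int × List Int) p =>
        let g := ((dist.length : Int) - pvCountLE dist p) + ((st.1.length : Int) - pvCountLE st.1 p)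
        (PySem.List.insert st.1 (pvCountLE st.1 p) p, st.2 ++ [g + 1])) (prev, acc)).2
      = acc ++ pvModel d0 pref rest := by
  intro rest
  induction rest with
  | nil => intro pref prev acc _ _; simp [pvModel]
  | cons p rest ih =>
    intro pref prev acc hperm hsort
    rw [List.foldl_cons]
    simp only []
    rw [pvCountLE_spec dist p hd, pvCountLE_spec prev p hsort]
    obtain ⟨hins_sorted, hins_perm⟩ := pvInsert_sorted prev p hsort
    have hperm' : (PySem.List.insert prev ((pvCntLE prev p : Nat) : Int) p).Perm (pref ++ [p]) :=
      hins_perm.trans (hperm.append_right [p])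
    rw [ih (pref ++ [p]) _ _ hperm' hins_sorted]
    simp only [pvModel, List.append_assoc, List.singleton_append]
    congr 2
    have e1 : (dist.length : Int) - (pvCntLE dist p : Int) = pvCntGt dist p := pvCnt_split dist p
    have e2 : (prev.length : Int) - (pvCntLE prev p : Int) = pvCntGt prev p := pvCnt_split prev p
    rw [e1, e2]
    unfold pvCntGt
    rw [hdperm.countP_eq, hperm.countP_eq]
theorem pvA_eq (ranked player : List Int) :
    climbingLeaderboard ranked player = pvModel (PySem.Set.ofList ranked) [] player := by
  unfold climbingLeaderboard
  have h1 : (PySem.List.sorted (PySem.Set.ofList ranked) (fun x => x) true).Perm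
      (PySem.Set.ofList ranked ++ []) := by
    simpa using PySem.List.sorted_perm (PySem.Set.ofList ranked) (fun x => x) true
  have h2 : (PySem.List.sorted (PySem.Set.ofList ranked) (fun x => x) true).Pairwise
      (fun a b => b ≤ a) := by
    simpa using PySem.List.sorted_pairwise_rev (xs := PySem.Set.ofList ranked) (key := fun x => x)
  simpa using pvA_fold (PySem.Set.ofList ranked) player [] _ [] h1 h2

theorem pvB_eq (ranked player : List Int) :
    climbingLeaderboard_alt ranked player = pvModel (PySem.Set.ofList ranked) [] player := by
  unfold climbingLeaderboard_alt
  have h1 : (PySem.List.sorted (PySem.Set.ofList ranked) (fun x => x) false).Perm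
      (PySem.Set.ofList ranked) := PySem.List.sorted_perm _ _ _
  have h2 : (PySem.List.sorted (PySem.Set.ofList ranked) (fun x => x) false).Pairwise (· ≤ ·) := by
    simpa using PySem.List.sorted_pairwise (xs := PySem.Set.ofList ranked) (key := fun x => x)
  simpa using pvB_fold (PySem.Set.ofList ranked)
    (PySem.List.sorted (PySem.Set.ofList ranked) (fun x => x) false) h1 h2 player [] [] []
    (List.Perm.refl []) (List.Pairwise.nil)

-- ===== VERDICT (by name: the statement is the Claim_ definition above) =====
theorem climbingLeaderboard_spec : Claim_equal_climbingLeaderboard := by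
  intro ranked player _
  unfold Spec_climbingLeaderboard
  rw [pvA_eq, pvB_eq]
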